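-- pv_equiv track=rewrite | github.com/VesperraHQ/algo | a2.py | short_dist
-- ===== SOURCE A (Python) =====
-- def short_dist(arr):
--     last_x = last_y = None
--     min_dist = float('inf')
--
--     for i, val in enumerate(arr):
--         if val == "X":
--             last_x = i
--             if last_y is not None:
--                 min_dist = min(min_dist, abs(last_x - last_y))
--         elif val == "Y":
--             last_y = i
--             if last_x is not None:
--                 min_dist = min(min_dist, abs(last_y - last_x))
--
--     return min_dist if min_dist != float('inf') else None
-- ===== SOURCE B (Python) =====
-- def short_dist(arr):
--     xs, ys = [], []
--     for i, val in enumerate(arr):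
--         if val == "X":
--             xs.append(i)
--         elif val == "Y":
--             ys.append(i)
--     if not xs or not ys:
--         return None
--     i = j = 0
--     best = None
--     while i < len(xs) and j < len(ys):
--         d = abs(xs[i] - ys[j])
--         if best is None or d < best:
--             best = d
--         if xs[i] < ys[j]:
--             i += 1
--         else:
--             j += 1
--     return best
-- ===== Notes on version B (the rewrite author's own statement) =====
-- stated objective: alternative
-- what changed: Replaces the incremental last-seen-index tracking with a build-then-merge strategy: collect the sorted index lists of 'X' and 'Y' in one pass, then a two-pointer merge over the two lists computes the minimum distance.
import Mathlib
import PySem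

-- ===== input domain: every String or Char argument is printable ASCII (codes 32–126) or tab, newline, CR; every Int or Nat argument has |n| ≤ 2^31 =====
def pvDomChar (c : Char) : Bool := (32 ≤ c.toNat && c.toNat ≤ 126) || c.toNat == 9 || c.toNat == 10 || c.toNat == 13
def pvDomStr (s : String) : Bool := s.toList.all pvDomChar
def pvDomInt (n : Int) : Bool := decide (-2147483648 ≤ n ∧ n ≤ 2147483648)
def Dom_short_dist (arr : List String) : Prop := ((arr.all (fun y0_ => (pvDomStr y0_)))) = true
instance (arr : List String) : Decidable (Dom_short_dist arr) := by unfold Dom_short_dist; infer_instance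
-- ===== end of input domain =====

-- B merges the two sorted index lists of 'X' and 'Y' with two pointers instead of
-- A's incremental last-seen tracking; same O(n) cost, alternative structure.

-- min with None = +infinity (Python's float('inf') / None-as-unset best)
def oMin (a : Option Int) (b : Option Int) : Option Int :=
  match a, b with
  | none, b => b
  | some a, none => some a
  | some a, some b => some (min a b)

-- ===== PORT A =====
def aStep (s : Option Int × Option Int × Option Int) (p : Int × String) :
    Option Int × Option Int × Option Int :=
  let (lx, ly, md) := s
  let (i, val) := p
  if val == "X" then
    match ly with
    | some y => (some i, ly, oMin md (some |i - y|))
    | none   => (some i, ly, md)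
  else if val == "Y" then
    match lx with
    | some x => (lx, some i, oMin md (some |i - x|))
    | none   => (lx, some i, md)
  else s

def short_dist (arr : List String) : Option Int :=
  ((PySem.List.enumerate arr 0).foldl aStep (none, none, none)).2.2

-- ===== PORT B =====
def collectStep (acc : List Int × List Int) (p : Int × String) : List Int × List Int :=
  if p.2 == "X" then (acc.1 ++ [p.1], acc.2)
  else if p.2 == "Y" then (acc.1, acc.2 ++ [p.1])
  else acc

-- faithful port of B's while-loop: the pointers i, j become the two list suffixes
def merge : List Int → List Int → Option Int → Option Int
  | [], _, best => best
  | _ :: _, [], best => best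
  | x :: xs, y :: ys, best =>
      let best' := oMin best (some |x - y|)
      if x < y then merge xs (y :: ys) best' else merge (x :: xs) ys best'
termination_by xs ys _ => xs.length + ys.length

def short_dist_alt (arr : List String) : Option Int :=
  let c := (PySem.List.enumerate arr 0).foldl collectStep ([], [])
  if c.1 = [] ∨ c.2 = [] then none
  else merge c.1 c.2 none

-- ===== PRECONDITION & SPEC =====
def Spec_short_dist (arr : List String) (out : Option Int) : Prop := out = short_dist_alt arr
instance (arr : List String) (out : Option Int) : Decidable (Spec_short_dist arr out) := by unfold Spec_short_dist; infer_instance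

-- ===== CLAIM (what is proved, stated in full; the proofs are below) =====
def Claim_equal_short_dist : Prop := ∀ (arr : List String), Dom_short_dist arr → Spec_short_dist arr (short_dist arr)

-- ===== LEMMAS AND PROOFS =====

-- indices of "X" / "Y" in l, counted from position k (proof-side reference)
def cFrom : List String → Int → List Int × List Int
  | [], _ => ([], [])
  | v :: l, k =>
    let c := cFrom l (k + 1)
    if v == "X" then (k :: c.1, c.2)
    else if v == "Y" then (c.1, k :: c.2) else c

def rowMin (x : Int) (ys : List Int) : Option Int :=
  ys.foldr (fun y acc => oMin (some |x - y|) acc) none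

def colMin (xs : List Int) (y : Int) : Option Int :=
  xs.foldr (fun x acc => oMin (some |x - y|) acc) none

def allMin (xs ys : List Int) : Option Int :=
  xs.foldr (fun x acc => oMin (rowMin x ys) acc) none

def maxOf? : List Int → Option Int
  | [] => none
  | y :: ys => some (ys.foldl max y)

theorem oMin_none_right (a : Option Int) : oMin a none = a := by cases a <;> rfl

theorem oMin_comm (a b : Option Int) : oMin a b = oMin b a := by
  cases a <;> cases b <;> simp [oMin] <;> omega

theorem oMin_assoc (a b c : Option Int) : oMin (oMin a b) c = oMin a (oMin b c) := by
  cases a <;> cases b <;> cases c <;> simp [oMin] <;> omega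

theorem oMin_absorb (d : Int) (b : Option Int) (h : ∀ m, b = some m → d ≤ m) :
    oMin (some d) b = some d := by
  cases b with
  | none => rfl
  | some m => simp [oMin]; have := h m rfl; omega

theorem foldl_max_le (c : Int) : ∀ (t : List Int) (y : Int), y ≤ c → (∀ z ∈ t, z ≤ c) →
    t.foldl max y ≤ c := by
  intro t
  induction t with
  | nil => intro y hy _; exact hy
  | cons z t ih =>
      intro y hy hz
      simp only [List.foldl_cons]
      exact ih (max y z) (by have := hz z (by simp); omega)
        (fun w hw => hz w (by simp [hw]))

theorem foldl_max_assoc : ∀ (l : List Int) (a b : Int),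
    l.foldl max (max a b) = max a (l.foldl max b) := by
  intro l
  induction l with
  | nil => intro a b; rfl
  | cons c l ih =>
      intro a b
      simp only [List.foldl_cons]
      rw [max_assoc, ih]

theorem maxOf?_append (xs : List Int) (k : Int) (h : ∀ m ∈ xs, m < k) :
    maxOf? (xs ++ [k]) = some k := by
  cases xs with
  | nil => rfl
  | cons x t =>
      simp only [maxOf?, List.cons_append, List.foldl_append, List.foldl_cons, List.foldl_nil]
      congr 1
      have hle : t.foldl max x ≤ k - 1 :=
        foldl_max_le (k - 1) t x (by have := h x (by simp); omega)
          (fun z hz => by have := h z (by simp [hz]); omega)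
      omega

theorem rowMin_cons (x y : Int) (ys : List Int) :
    rowMin x (y :: ys) = oMin (some |x - y|) (rowMin x ys) := rfl

theorem rowMin_none (x : Int) (t : List Int) : rowMin x t = none ↔ t = [] := by
  cases t with
  | nil => simp [rowMin]
  | cons a t => rw [rowMin_cons]; cases rowMin x t <;> simp [oMin]

theorem rowMin_mem_le (x : Int) : ∀ (ys : List Int) (m : Int), rowMin x ys = some m →
    ∃ y ∈ ys, m = |x - y| ∧ ∀ y' ∈ ys, m ≤ |x - y'| := by
  intro ys
  induction ys with
  | nil => intro m h; simp [rowMin] at h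
  | cons y t ih =>
      intro m h
      rw [rowMin_cons] at h
      cases ht : rowMin x t with
      | none =>
          have htnil := (rowMin_none x t).mp ht
          subst htnil
          rw [ht, oMin_none_right] at h
          simp at h
          exact ⟨y, by simp, by omega, by intro y' hy'; simp at hy'; subst hy'; omega⟩
      | some m' =>
          rw [ht] at h
          simp [oMin] at h
          obtain ⟨y0, hy0, hm', hall⟩ := ih m' ht
          by_cases hc : |x - y| ≤ m'
          · refine ⟨y, by simp, by omega, ?_⟩
            intro y' hy'
            rcases List.mem_cons.mp hy' with h1 | h1
            · subst h1; omega
            · have := hall y' h1; omega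
          · refine ⟨y0, by simp [hy0], by omega, ?_⟩
            intro y' hy'
            rcases List.mem_cons.mp hy' with h1 | h1
            · subst h1; omega
            · have := hall y' h1; omega

theorem rowMin_max (k : Int) : ∀ (ys : List Int) (y0 : Int) (t : List Int),
    ys = y0 :: t → (∀ y ∈ ys, y < k) → rowMin k ys = some (k - t.foldl max y0) := by
  intro ys
  induction ys with
  | nil => intro y0 t h; simp at h
  | cons y s ih =>
      intro y0 t heq hlt
      obtain ⟨hy, hs⟩ : y = y0 ∧ s = t := by
        constructor <;> [exact (List.cons.injEq .. ▸ heq).1; exact (List.cons.injEq .. ▸ heq).2]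
      subst hy hs
      cases s with
      | nil =>
          have : |k - y| = k - y := abs_of_nonneg (by have := hlt y (by simp); omega)
          simp [rowMin, oMin, this]
      | cons z s' =>
          rw [rowMin_cons, ih z s' rfl (fun w hw => hlt w (by simp [List.mem_cons] at hw ⊢; tauto))]
          have h1 : |k - y| = k - y := abs_of_nonneg (by have := hlt y (by simp); omega)
          simp only [oMin, h1]
          congr 1
          have : s'.foldl max (max y z) = max y (s'.foldl max z) := foldl_max_assoc s' y z
          simp only [List.foldl_cons, this]
          omega

theorem colMin_eq_rowMin (xs : List Int) (y : Int) : colMin xs y = rowMin y xs := by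
  induction xs with
  | nil => rfl
  | cons x t ih =>
      rw [show colMin (x :: t) y = oMin (some |x - y|) (colMin t y) from rfl,
        rowMin_cons, ih, abs_sub_comm]

theorem allMin_cons (x : Int) (xs ys : List Int) :
    allMin (x :: xs) ys = oMin (rowMin x ys) (allMin xs ys) := rfl

theorem allMin_nil_right (xs : List Int) : allMin xs [] = none := by
  induction xs with
  | nil => rfl
  | cons x t ih => rw [allMin_cons, ih]; rfl

theorem allMin_cons_right (y : Int) : ∀ (xs ys : List Int),
    allMin xs (y :: ys) = oMin (colMin xs y) (allMin xs ys) := by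
  intro xs
  induction xs with
  | nil => intro ys; rfl
  | cons x t ih =>
      intro ys
      rw [allMin_cons, allMin_cons, rowMin_cons, ih]
      show oMin (oMin (some |x - y|) (rowMin x ys)) (oMin (colMin t y) (allMin t ys)) =
        oMin (oMin (some |x - y|) (colMin t y)) (oMin (rowMin x ys) (allMin t ys))
      rw [oMin_assoc, oMin_assoc, ← oMin_assoc (rowMin x ys), oMin_comm (rowMin x ys) (colMin t y),
        oMin_assoc]

theorem allMin_append_left (k : Int) : ∀ (xs ys : List Int),
    allMin (xs ++ [k]) ys = oMin (allMin xs ys) (rowMin k ys) := by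
  intro xs
  induction xs with
  | nil =>
      intro ys
      show allMin [k] ys = oMin none (rowMin k ys)
      rw [allMin_cons]
      show oMin (rowMin k ys) (allMin [] ys) = oMin none (rowMin k ys)
      rw [oMin_comm]
      rfl
  | cons x t ih =>
      intro ys
      rw [List.cons_append, allMin_cons, ih, allMin_cons, oMin_assoc]

theorem allMin_append_right (k : Int) : ∀ (ys xs : List Int),
    allMin xs (ys ++ [k]) = oMin (allMin xs ys) (colMin xs k) := by
  intro ys
  induction ys with
  | nil =>
      intro xs
      rw [allMin_nil_right]
      show allMin xs [k] = oMin none (colMin xs k)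
      rw [allMin_cons_right, allMin_nil_right, oMin_none_right]
      rfl
  | cons y t ih =>
      intro xs
      rw [List.cons_append, allMin_cons_right, ih, allMin_cons_right, oMin_assoc]

-- cFrom bounds/sortedness
theorem cFrom_bound : ∀ (l : List String) (k : Int),
    (∀ m ∈ (cFrom l k).1, k ≤ m) ∧ (∀ m ∈ (cFrom l k).2, k ≤ m) := by
  intro l
  induction l with
  | nil => intro k; simp [cFrom]
  | cons v t ih =>
      intro k
      have := ih (k + 1)
      simp only [cFrom]
      split
      · constructor
        · intro m hm
          rcases List.mem_cons.mp hm with h | h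
          · omega
          · have := this.1 m h; omega
        · intro m hm; have := this.2 m hm; omega
      · split
        · constructor
          · intro m hm; have := this.1 m hm; omega
          · intro m hm
            rcases List.mem_cons.mp hm with h | h
            · omega
            · have := this.2 m h; omega
        · exact ⟨fun m hm => by have := this.1 m hm; omega,
            fun m hm => by have := this.2 m hm; omega⟩

theorem cFrom_sorted : ∀ (l : List String) (k : Int),
    ((cFrom l k).1.Pairwise (· < ·)) ∧ ((cFrom l k).2.Pairwise (· < ·)) := by
  intro l
  induction l with
  | nil => intro k; simp [cFrom]
  | cons v t ih =>
      intro k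
      have hb := cFrom_bound t (k + 1)
      have hs := ih (k + 1)
      simp only [cFrom]
      split
      · exact ⟨List.pairwise_cons.mpr ⟨fun m hm => by have := hb.1 m hm; omega, hs.1⟩, hs.2⟩
      · split
        · exact ⟨hs.1, List.pairwise_cons.mpr ⟨fun m hm => by have := hb.2 m hm; omega, hs.2⟩⟩
        · exact hs

-- B's collector fold computes cFrom
theorem collect_eq : ∀ (l : List String) (k : Int) (a b : List Int),
    (PySem.List.enumerate l k).foldl collectStep (a, b) =
      (a ++ (cFrom l k).1, b ++ (cFrom l k).2) := by
  intro l
  induction l with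
  | nil => intro k a b; simp [PySem.List.enumerate_nil, cFrom]
  | cons v t ih =>
      intro k a b
      rw [PySem.List.enumerate_cons]
      simp only [List.foldl_cons, cFrom, collectStep]
      split
      · rw [ih]; simp
      · split
        · rw [ih]; simp
        · rw [ih]

-- merge computes the all-pairs minimum on sorted lists
theorem merge_eq : ∀ (xs ys : List Int) (best : Option Int),
    xs.Pairwise (· < ·) → ys.Pairwise (· < ·) →
    merge xs ys best = oMin best (allMin xs ys) := by
  intro xs ys best hx hy
  fun_induction merge xs ys best with
  | case1 ys best => rw [show allMin ([] : List Int) ys = none from rfl, oMin_none_right]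
  | case2 x xs best => rw [allMin_nil_right, oMin_none_right]
  | case3 x xs y ys best best' hlt ih =>
      rw [show best' = oMin best (some |x - y|) from rfl] at ih ⊢
      rw [ih (List.Pairwise.sublist (List.sublist_cons_self x xs) hx) hy]
      have hr : rowMin x (y :: ys) = some |x - y| := by
        rw [rowMin_cons]
        apply oMin_absorb
        intro m hm
        obtain ⟨y', hy', hm', _⟩ := rowMin_mem_le x ys m hm
        have hyy : y < y' := (List.pairwise_cons.mp hy).1 y' hy'
        have h1 : |x - y| = y - x := by rw [abs_sub_comm]; exact abs_of_nonneg (by omega)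
        have h2 : |x - y'| = y' - x := by rw [abs_sub_comm]; exact abs_of_nonneg (by omega)
        omega
      rw [allMin_cons, hr, ← oMin_assoc]
  | case4 x xs y ys best best' hlt ih =>
      rw [show best' = oMin best (some |x - y|) from rfl] at ih ⊢
      rw [ih hx (List.Pairwise.sublist (List.sublist_cons_self y ys) hy)]
      have hr : colMin (x :: xs) y = some |x - y| := by
        rw [colMin_eq_rowMin, rowMin_cons, abs_sub_comm y x]
        apply oMin_absorb
        intro m hm
        obtain ⟨x', hx', hm', _⟩ := rowMin_mem_le y xs m hm
        have hxx : x < x' := (List.pairwise_cons.mp hx).1 x' hx'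
        have h1 : |x - y| = x - y := abs_of_nonneg (by omega)
        have h2 : |y - x'| = x' - y := by rw [abs_sub_comm]; exact abs_of_nonneg (by omega)
        omega
      rw [allMin_cons_right, hr, ← oMin_assoc]

-- A's loop invariant: after a prefix whose X-indices are xs and Y-indices ys (all < k),
-- the state is (maxOf? xs, maxOf? ys, allMin xs ys); the last-seen index is the max.
theorem aStep_X (xs ys : List Int) (k : Int) (hxk : ∀ m ∈ xs, m < k) (hyk : ∀ m ∈ ys, m < k) :
    aStep (maxOf? xs, maxOf? ys, allMin xs ys) (k, "X") =
      (maxOf? (xs ++ [k]), maxOf? ys, allMin (xs ++ [k]) ys) := by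
  cases ys with
  | nil =>
      rw [allMin_nil_right, allMin_nil_right, maxOf?_append xs k hxk]
      rfl
  | cons y0 yt =>
      have hM : yt.foldl max y0 < k := by
        have := foldl_max_le (k - 1) yt y0
          (by have := hyk y0 (by simp); omega)
          (fun z hz => by have := hyk z (by simp [hz]); omega)
        omega
      have habs : |k - yt.foldl max y0| = k - yt.foldl max y0 := abs_of_nonneg (by omega)
      rw [maxOf?_append xs k hxk, allMin_append_left, rowMin_max k (y0 :: yt) y0 yt rfl hyk]
      show (some k, maxOf? (y0 :: yt), oMin (allMin xs (y0 :: yt)) (some |k - yt.foldl max y0|)) = _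
      rw [habs]

theorem aStep_Y (xs ys : List Int) (k : Int) (hxk : ∀ m ∈ xs, m < k) (hyk : ∀ m ∈ ys, m < k) :
    aStep (maxOf? xs, maxOf? ys, allMin xs ys) (k, "Y") =
      (maxOf? xs, maxOf? (ys ++ [k]), allMin xs (ys ++ [k])) := by
  cases xs with
  | nil =>
      rw [maxOf?_append ys k hyk, allMin_append_right, colMin_eq_rowMin]
      rw [show allMin ([] : List Int) ys = none from rfl,
        show rowMin k ([] : List Int) = none from rfl]
      rfl
  | cons x0 xt =>
      have hM : xt.foldl max x0 < k := by
        have := foldl_max_le (k - 1) xt x0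
          (by have := hxk x0 (by simp); omega)
          (fun z hz => by have := hxk z (by simp [hz]); omega)
        omega
      have habs : |k - xt.foldl max x0| = k - xt.foldl max x0 := abs_of_nonneg (by omega)
      rw [maxOf?_append ys k hyk, allMin_append_right, colMin_eq_rowMin,
        rowMin_max k (x0 :: xt) x0 xt rfl hxk]
      show (maxOf? (x0 :: xt), some k, oMin (allMin (x0 :: xt) ys) (some |k - xt.foldl max x0|)) = _
      rw [habs]

theorem aStep_other (s : Option Int × Option Int × Option Int) (k : Int) (v : String)
    (h1 : v ≠ "X") (h2 : v ≠ "Y") : aStep s (k, v) = s := by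
  obtain ⟨lx, ly, md⟩ := s
  simp [aStep, h1, h2]

theorem a_loop : ∀ (l : List String) (k : Int) (xs ys : List Int),
    (∀ m ∈ xs, m < k) → (∀ m ∈ ys, m < k) →
    (PySem.List.enumerate l k).foldl aStep (maxOf? xs, maxOf? ys, allMin xs ys) =
      (maxOf? (xs ++ (cFrom l k).1), maxOf? (ys ++ (cFrom l k).2),
       allMin (xs ++ (cFrom l k).1) (ys ++ (cFrom l k).2)) := by
  intro l
  induction l with
  | nil => intro k xs ys _ _; simp [PySem.List.enumerate_nil, cFrom]
  | cons v t ih =>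
      intro k xs ys hxk hyk
      rw [PySem.List.enumerate_cons, List.foldl_cons]
      by_cases hX : v = "X"
      · subst hX
        rw [aStep_X xs ys k hxk hyk, ih (k + 1) (xs ++ [k]) ys
          (fun m hm => by rcases List.mem_append.mp hm with h | h
                          · have := hxk m h; omega
                          · simp at h; omega)
          (fun m hm => by have := hyk m hm; omega)]
        have hc : cFrom ("X" :: t) k = (k :: (cFrom t (k + 1)).1, (cFrom t (k + 1)).2) := by
          simp [cFrom]
        rw [hc, List.append_cons xs k (cFrom t (k + 1)).1]
      · by_cases hY : v = "Y"
        · subst hY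
          rw [aStep_Y xs ys k hxk hyk, ih (k + 1) xs (ys ++ [k])
            (fun m hm => by have := hxk m hm; omega)
            (fun m hm => by rcases List.mem_append.mp hm with h | h
                            · have := hyk m h; omega
                            · simp at h; omega)]
          have hc : cFrom ("Y" :: t) k = ((cFrom t (k + 1)).1, k :: (cFrom t (k + 1)).2) := by
            simp [cFrom]
          rw [hc, List.append_cons ys k (cFrom t (k + 1)).2]
        · rw [aStep_other _ k v hX hY, ih (k + 1) xs ys
            (fun m hm => by have := hxk m hm; omega)
            (fun m hm => by have := hyk m hm; omega)]
          have hc : cFrom (v :: t) k = cFrom t (k + 1) := by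
            simp [cFrom, hX, hY]
          rw [hc]

-- ===== VERDICT (by name: the statement is the Claim_ definition above) =====
theorem short_dist_spec : Claim_equal_short_dist := by
  intro arr _
  unfold Spec_short_dist short_dist short_dist_alt
  rw [show ((none, none, none) : Option Int × Option Int × Option Int) =
      (maxOf? [], maxOf? [], allMin [] []) from rfl,
    a_loop arr 0 [] [] (by simp) (by simp),
    collect_eq arr 0 [] []]
  simp only [List.nil_append]
  by_cases h : (cFrom arr 0).1 = [] ∨ (cFrom arr 0).2 = []
  · rw [if_pos h]
    rcases h with h | h
    · rw [h, show allMin [] (cFrom arr 0).2 = none from rfl]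
    · rw [h, allMin_nil_right]
  · rw [if_neg h,
      merge_eq (cFrom arr 0).1 (cFrom arr 0).2 none (cFrom_sorted arr 0).1 (cFrom_sorted arr 0).2]
    rfl
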